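-- pv_equiv track=rewrite | github.com/toastx/litcoder-assignment-python | mod3/lab1/cookies/main.py | min_steps_to_target_sweetness
-- ===== SOURCE A (Python) =====
-- def min_steps_to_target_sweetness(target_sweetness, candies):
--     candies.sort()
--     steps = 0
--
--     while candies[0] < target_sweetness:
--         least_sweet = candies.pop(0)
--         second_least_sweet = candies.pop(0)
--         new_candy = least_sweet + 2 * second_least_sweet
--         candies.insert(0, new_candy)
--         candies.sort()
--         steps += 1
--
--     return steps
-- ===== SOURCE B (Python) =====
-- # Two-queue merge strategy: sort once, keep merged candies in a second FIFO queue
-- # (they come out in non-decreasing order), so each step pops the two smallest in O(1)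
-- # instead of re-sorting and popping from the front of a list.
-- # Note: unlike A, B does not mutate its `candies` argument (return value is the same).
-- def min_steps_to_target_sweetness(target_sweetness, candies):
--     orig = sorted(candies)
--     merged = []
--     i = 0
--     j = 0
--     steps = 0
--
--     def peek_smallest():
--         if i < len(orig) and (j >= len(merged) or orig[i] <= merged[j]):
--             return orig[i]
--         return merged[j]
--
--     def pop_smallest():
--         nonlocal i, j
--         if i < len(orig) and (j >= len(merged) or orig[i] <= merged[j]):
--             i += 1
--             return orig[i - 1]
--         v = merged[j]
--         j += 1
--         return v
--
--     while peek_smallest() < target_sweetness: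
--         least = pop_smallest()
--         second = pop_smallest()
--         merged.append(least + 2 * second)
--         steps += 1
--     return steps
-- ===== Notes on version B (the rewrite author's own statement) =====
-- stated objective: faster
-- what changed: Instead of re-sorting the whole list and popping from its front on every step, B sorts once and keeps newly merged candies in a second FIFO queue whose values are provably non-decreasing, so the two smallest candies are found and removed in O(1) per step.
import Mathlib
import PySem

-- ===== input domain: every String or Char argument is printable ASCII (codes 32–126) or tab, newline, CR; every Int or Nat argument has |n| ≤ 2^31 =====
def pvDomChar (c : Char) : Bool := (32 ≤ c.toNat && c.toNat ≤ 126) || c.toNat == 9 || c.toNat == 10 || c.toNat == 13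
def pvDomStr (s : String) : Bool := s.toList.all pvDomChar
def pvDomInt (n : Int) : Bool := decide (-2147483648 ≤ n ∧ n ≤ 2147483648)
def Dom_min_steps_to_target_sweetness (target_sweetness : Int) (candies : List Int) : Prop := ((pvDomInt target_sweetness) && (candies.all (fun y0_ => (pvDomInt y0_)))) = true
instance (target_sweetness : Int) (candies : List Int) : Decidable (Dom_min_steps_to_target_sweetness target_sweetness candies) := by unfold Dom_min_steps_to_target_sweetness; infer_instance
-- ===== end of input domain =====

-- B replaces A's re-sort-every-step loop with a one-sort two-queue merge (merged candies
-- leave the queue in non-decreasing order); return values agree wherever A returns.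
-- (A mutates its `candies` argument in Python; the equivalence proved here is about the return value only.)


-- ===== PORT A =====
-- candies.sort()  (Python's sorted order on ints)
def pvSortInt (l : List Int) : List Int := PySem.List.sorted l (fun x => x) false

-- A's while loop: while candies[0] < target: pop two smallest, insert least+2*second at 0, re-sort.
-- Where Python raises IndexError (candies exhausted, or initially empty) the port returns the
-- steps counted so far; those inputs are excluded by Pre_.
def pvALoop (t : Int) (candies : List Int) (steps : Int) : Int :=
  match candies with
  | [] => steps                  -- candies[0] / pop(0): IndexError in Python (outside Pre_)
  | x :: rest =>
    if x < t then
      match rest with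
      | [] => steps              -- second pop(0): IndexError in Python (outside Pre_)
      | y :: r => pvALoop t (pvSortInt ((x + 2 * y) :: r)) (steps + 1)
    else steps
termination_by candies.length
decreasing_by simp [pvSortInt, PySem.List.length_sorted]

def min_steps_to_target_sweetness (target_sweetness : Int) (candies : List Int) : Int :=
  pvALoop target_sweetness (pvSortInt candies) 0

-- ===== PORT B =====
-- peek_smallest(): front of orig (suffix o) if it exists and is ≤ front of merged (suffix m), else front of merged.
def pvPeek (o m : List Int) : Option Int :=
  match o, m with
  | [], [] => none               -- merged[j]: IndexError in Python (outside Pre_)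
  | x :: _, [] => some x
  | [], y :: _ => some y
  | x :: _, y :: _ => some (if x ≤ y then x else y)

-- pop_smallest(): same selection, also advancing the chosen queue.
def pvPop (o m : List Int) : Option (Int × List Int × List Int) :=
  match o, m with
  | [], [] => none               -- merged[j]: IndexError in Python (outside Pre_)
  | x :: o', [] => some (x, o', [])
  | [], y :: m' => some (y, [], m')
  | x :: o', y :: m' => if x ≤ y then some (x, o', y :: m') else some (y, x :: o', m')

-- pop_smallest() removes exactly one element and leaves the two queues' tails
-- (needed by pvBLoop for termination, and by the proofs below)
theorem pvPop_shape {o m o' m' : List Int} {a : Int} (h : pvPop o m = some (a, o', m')) :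
    (o = a :: o' ∧ m' = m) ∨ (o' = o ∧ m = a :: m') := by
  match o, m with
  | [], [] => simp [pvPop] at h
  | x :: o1, [] =>
    simp only [pvPop, Option.some.injEq, Prod.mk.injEq] at h
    obtain ⟨h1, h2, h3⟩ := h
    exact Or.inl ⟨by rw [h1, h2], h3.symm⟩
  | [], y :: m1 =>
    simp only [pvPop, Option.some.injEq, Prod.mk.injEq] at h
    obtain ⟨h1, h2, h3⟩ := h
    exact Or.inr ⟨h2.symm, by rw [h1, h3]⟩
  | x :: o1, y :: m1 =>
    simp only [pvPop] at h
    split at h <;> simp only [Option.some.injEq, Prod.mk.injEq] at h <;> obtain ⟨h1, h2, h3⟩ := h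
    · exact Or.inl ⟨by rw [h1, h2], h3.symm⟩
    · exact Or.inr ⟨h2.symm, by rw [h1, h3]⟩

theorem pvPop_len {o m o' m' : List Int} {a : Int}
    (h : pvPop o m = some (a, o', m')) : o'.length + m'.length + 1 = o.length + m.length := by
  rcases pvPop_shape h with ⟨rfl, rfl⟩ | ⟨rfl, rfl⟩ <;> simp <;> omega

-- B's while loop over the two queues.
def pvBLoop (t : Int) (o m : List Int) (steps : Int) : Int :=
  match pvPeek o m with
  | none => steps                -- peek_smallest(): IndexError in Python (outside Pre_)
  | some s =>
    if s < t then
      match h1 : pvPop o m with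
      | none => steps
      | some (a, o1, m1) =>
        match h2 : pvPop o1 m1 with
        | none => steps          -- second pop_smallest(): IndexError in Python (outside Pre_)
        | some (b, o2, m2) => pvBLoop t o2 (m2 ++ [a + 2 * b]) (steps + 1)
    else steps
termination_by o.length + m.length
decreasing_by
  have l1 := pvPop_len h1
  have l2 := pvPop_len h2
  simp only [List.length_append, List.length_cons, List.length_nil]
  omega

def min_steps_to_target_sweetness_alt (target_sweetness : Int) (candies : List Int) : Int :=
  pvBLoop target_sweetness (pvSortInt candies) [] 0

-- ===== PRECONDITION & SPEC =====
-- The greedy-merge reachability predicate: on the sorted list, does the minimum reach the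
-- target before the candies run out?  (Independent of both ports: it keeps the working
-- multiset as one sorted list via ordered insertion and returns only a Bool, no step count.
-- The Nat argument is the exact number of candies still held — each merge consumes one —
-- written as a separate argument only so the recursion is structural.)
def pvReachAux (t : Int) : Nat → List Int → Bool
  | _, [] => false
  | 0, _ :: _ => false
  | n + 1, x :: rest =>
    if t ≤ x then true
    else
      match rest with
      | [] => false
      | y :: r => pvReachAux t n (List.orderedInsert (· ≤ ·) (x + 2 * y) r)

def pvReach (t : Int) (l : List Int) : Bool := pvReachAux t l.length l

-- Pre_ excludes exactly the inputs on which A raises IndexError (the empty list, or the greedy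
-- merge exhausts all candies with the minimum still below the target); that set has no closed
-- form, so Pre_ states it by the greedy-merge reachability predicate above; B's Python raises
-- IndexError on exactly those inputs too.
def Pre_min_steps_to_target_sweetness (target_sweetness : Int) (candies : List Int) : Prop :=
  pvReach target_sweetness ((candies.foldr (fun a acc => List.orderedInsert (· ≤ ·) a acc) [])) = true

instance (target_sweetness : Int) (candies : List Int) : Decidable (Pre_min_steps_to_target_sweetness target_sweetness candies) := by
  unfold Pre_min_steps_to_target_sweetness; infer_instance

def pvWitness_min_steps_to_target_sweetness : Int × List Int := (3, [1, 2, 4])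

def Spec_min_steps_to_target_sweetness (target_sweetness : Int) (candies : List Int) (out : Int) : Prop := out = min_steps_to_target_sweetness_alt target_sweetness candies
instance (target_sweetness : Int) (candies : List Int) (out : Int) : Decidable (Spec_min_steps_to_target_sweetness target_sweetness candies out) := by unfold Spec_min_steps_to_target_sweetness; infer_instance

-- ===== CLAIM (what is proved, stated in full; the proofs are below) =====
def Claim_equal_min_steps_to_target_sweetness : Prop := ∀ (target_sweetness : Int) (candies : List Int), Dom_min_steps_to_target_sweetness target_sweetness candies → Pre_min_steps_to_target_sweetness target_sweetness candies → Spec_min_steps_to_target_sweetness target_sweetness candies (min_steps_to_target_sweetness target_sweetness candies)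

-- ===== LEMMAS AND PROOFS =====

-- the multiset of candies B holds, in sorted order: the merge of its two sorted queues
def pvMerge : List Int → List Int → List Int
  | [], m => m
  | o, [] => o
  | x :: o, y :: m => if x ≤ y then x :: pvMerge o (y :: m) else y :: pvMerge (x :: o) m
termination_by o m => o.length + m.length

-- B's history invariant: every merged value is ≤ 3·(any original value still queued), and
-- within the merged queue each later value is ≤ 3·(any earlier value).
def pvInv (o m : List Int) : Prop :=
  (∀ v ∈ m, ∀ z ∈ o, v ≤ 3 * z) ∧ m.Pairwise (fun u v => v ≤ 3 * u)

theorem pvMerge_nil (o : List Int) : pvMerge o [] = o := by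
  cases o <;> simp [pvMerge]

theorem pvMerge_perm (o m : List Int) : (pvMerge o m).Perm (o ++ m) := by
  fun_induction pvMerge o m with
  | case1 m => simp
  | case2 o h => simp
  | case3 x o y m hxy ih => exact ih.cons x
  | case4 x o y m hxy ih =>
    exact (ih.cons y).trans (List.perm_middle (l₁ := x :: o) (l₂ := m)).symm

theorem pvMerge_pairwise : ∀ {o m : List Int}, o.Pairwise (· ≤ ·) → m.Pairwise (· ≤ ·) →
    (pvMerge o m).Pairwise (· ≤ ·) := by
  intro o m
  fun_induction pvMerge o m with
  | case1 m => intro _ hm; exact hm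
  | case2 o h => intro ho _; exact ho
  | case3 x o y m hxy ih =>
    intro ho hm
    refine List.pairwise_cons.mpr ⟨?_, ih (List.Pairwise.of_cons ho) hm⟩
    intro z hz
    rcases List.mem_append.mp ((pvMerge_perm o (y :: m)).mem_iff.mp hz) with hz | hz
    · exact (List.pairwise_cons.mp ho).1 z hz
    · rcases List.mem_cons.mp hz with rfl | hz
      · exact hxy
      · exact le_trans hxy ((List.pairwise_cons.mp hm).1 z hz)
  | case4 x o y m hxy ih =>
    intro ho hm
    have hyx : y ≤ x := le_of_not_ge hxy
    refine List.pairwise_cons.mpr ⟨?_, ih ho (List.Pairwise.of_cons hm)⟩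
    intro z hz
    rcases List.mem_append.mp ((pvMerge_perm (x :: o) m).mem_iff.mp hz) with hz | hz
    · rcases List.mem_cons.mp hz with rfl | hz
      · exact hyx
      · exact le_trans hyx ((List.pairwise_cons.mp ho).1 z hz)
    · exact (List.pairwise_cons.mp hm).1 z hz

theorem pvPeek_eq_head (o m : List Int) : pvPeek o m = (pvMerge o m).head? := by
  cases o <;> cases m <;> simp [pvPeek, pvMerge]
  split <;> simp

theorem pvPop_none {o m : List Int} (h : pvPop o m = none) : o = [] ∧ m = [] := by
  cases o <;> cases m <;> simp [pvPop] at h ⊢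
  split at h <;> simp at h

theorem pvPop_mg {o m o' m' : List Int} {a : Int} (h : pvPop o m = some (a, o', m')) :
    pvMerge o m = a :: pvMerge o' m' := by
  match o, m with
  | [], [] => simp [pvPop] at h
  | x :: o1, [] =>
    simp only [pvPop, Option.some.injEq, Prod.mk.injEq] at h
    obtain ⟨rfl, rfl, rfl⟩ := h
    simp [pvMerge_nil]
  | [], y :: m1 =>
    simp only [pvPop, Option.some.injEq, Prod.mk.injEq] at h
    obtain ⟨rfl, rfl, rfl⟩ := h
    simp [pvMerge]
  | x :: o1, y :: m1 =>
    simp only [pvPop] at h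
    split at h <;> simp only [Option.some.injEq, Prod.mk.injEq] at h <;> obtain ⟨rfl, rfl, rfl⟩ := h
    · simp [pvMerge, *]
    · simp [pvMerge, *]

-- facts preserved by a single pop_smallest()
theorem pvPop_facts {o m o' m' : List Int} {a : Int} (h : pvPop o m = some (a, o', m'))
    (ho : o.Pairwise (· ≤ ·)) (hm : m.Pairwise (· ≤ ·)) (h3 : m.Pairwise (fun u v => v ≤ 3 * u)) :
    o'.Pairwise (· ≤ ·) ∧ m'.Pairwise (· ≤ ·) ∧ m'.Pairwise (fun u v => v ≤ 3 * u) ∧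
    (∀ z ∈ o', z ∈ o) ∧ (∀ z ∈ m', z ∈ m) ∧ (a ∈ o ∨ ∀ z ∈ m', z ≤ 3 * a) := by
  rcases pvPop_shape h with ⟨rfl, rfl⟩ | ⟨rfl, rfl⟩
  · exact ⟨List.Pairwise.of_cons ho, hm, h3, fun z hz => List.mem_cons_of_mem a hz,
      fun z hz => hz, Or.inl (List.mem_cons_self)⟩
  · exact ⟨ho, List.Pairwise.of_cons hm, List.Pairwise.of_cons h3, fun z hz => hz,
      fun z hz => List.mem_cons_of_mem a hz, Or.inr (List.pairwise_cons.mp h3).1⟩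

-- one step of B preserves sortedness of both queues and the invariant, and performs
-- exactly A's transformation on the merged view
theorem pvStep {o m o1 m1 o2 m2 : List Int} {a b : Int}
    (ho : o.Pairwise (· ≤ ·)) (hm : m.Pairwise (· ≤ ·)) (hinv : pvInv o m)
    (h1 : pvPop o m = some (a, o1, m1)) (h2 : pvPop o1 m1 = some (b, o2, m2)) :
    o2.Pairwise (· ≤ ·) ∧ (m2 ++ [a + 2 * b]).Pairwise (· ≤ ·) ∧ pvInv o2 (m2 ++ [a + 2 * b]) ∧
    pvMerge o m = a :: b :: pvMerge o2 m2 := by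
  obtain ⟨hi1, hi2⟩ := hinv
  have hmg : pvMerge o m = a :: b :: pvMerge o2 m2 := by rw [pvPop_mg h1, pvPop_mg h2]
  have hpw : (a :: b :: pvMerge o2 m2).Pairwise (· ≤ ·) := hmg ▸ pvMerge_pairwise ho hm
  have hab : a ≤ b := (List.pairwise_cons.mp hpw).1 b (by simp)
  have hbr : ∀ z ∈ pvMerge o2 m2, b ≤ z := (List.pairwise_cons.mp (List.pairwise_cons.mp hpw).2).1
  have hmem : ∀ z ∈ o2 ++ m2, b ≤ z := fun z hz => hbr z ((pvMerge_perm o2 m2).mem_iff.mpr hz)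
  have hbo2 : ∀ z ∈ o2, b ≤ z := fun z hz => hmem z (List.mem_append_left _ hz)
  have hbm2 : ∀ z ∈ m2, b ≤ z := fun z hz => hmem z (List.mem_append_right _ hz)
  obtain ⟨ho1, hm1, h31, hoo1, hmm1, hw1⟩ := pvPop_facts h1 ho hm hi2
  obtain ⟨ho2, hm2, h32, hoo2, hmm2, _⟩ := pvPop_facts h2 ho1 hm1 h31
  -- z ≤ 3 * a for every candy still in the merged queue
  have hkey : ∀ z ∈ m2, z ≤ 3 * a := by
    intro z hz
    rcases hw1 with ha | ha
    · exact hi1 z (hmm1 z (hmm2 z hz)) a ha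
    · exact ha z (hmm2 z hz)
  refine ⟨ho2, ?_, ⟨?_, ?_⟩, hmg⟩
  · -- (m2 ++ [a + 2*b]) sorted
    refine List.pairwise_append.mpr ⟨hm2, by simp, ?_⟩
    intro u hu v hv
    simp only [List.mem_singleton] at hv
    subst hv
    have := hkey u hu
    omega
  · -- part 1 of the invariant
    intro v hv z hz
    rcases List.mem_append.mp hv with hv | hv
    · exact hi1 v (hmm1 v (hmm2 v hv)) z (hoo1 z (hoo2 z hz))
    · simp only [List.mem_singleton] at hv
      subst hv
      have := hbo2 z hz
      omega
  · -- part 2 of the invariant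
    refine List.pairwise_append.mpr ⟨h32, by simp, ?_⟩
    intro u hu v hv
    simp only [List.mem_singleton] at hv
    subst hv
    have := hbm2 u hu
    omega

theorem pvBLoop_eq (t : Int) : ∀ (n : Nat) (o m : List Int) (steps : Int),
    o.length + m.length = n → o.Pairwise (· ≤ ·) → m.Pairwise (· ≤ ·) → pvInv o m →
    pvBLoop t o m steps = pvALoop t (pvMerge o m) steps := by
  intro n
  induction n using Nat.strong_induction_on with
  | _ n ih =>
    intro o m steps hlen ho hm hinv
    rw [pvBLoop]
    split
    · -- peek returned none: both queues empty
      next hp =>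
      have hh := pvPeek_eq_head o m
      rw [hp] at hh
      have hnil : pvMerge o m = [] := List.head?_eq_none_iff.mp hh.symm
      simp [hnil, pvALoop]
    · next s hp =>
      have hh := pvPeek_eq_head o m
      rw [hp] at hh
      split
      · next hst =>
        split
        · next h1 =>
          obtain ⟨rfl, rfl⟩ := pvPop_none h1
          simp [pvPeek] at hp
        · next a o1 m1 h1 =>
          have hmg1 := pvPop_mg h1
          have hsa : a = s := by
            rw [hmg1] at hh
            simpa using hh.symm
          subst hsa
          split
          · next h2 =>
            obtain ⟨rfl, rfl⟩ := pvPop_none h2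
            rw [hmg1, pvMerge_nil]
            simp [pvALoop, hst]
          · next b o2 m2 h2 =>
            obtain ⟨ho2, hm2n, hinv2, hmg⟩ := pvStep ho hm hinv h1 h2
            have hl1 := pvPop_len h1
            have hl2 := pvPop_len h2
            rw [hmg]
            simp only [pvALoop, hst, if_true]
            have hsort : pvSortInt ((a + 2 * b) :: pvMerge o2 m2) = pvMerge o2 (m2 ++ [a + 2 * b]) := by
              apply PySem.List.sorted_id_eq_of_perm_of_pairwise
              · refine (pvMerge_perm o2 (m2 ++ [a + 2 * b])).trans ?_
                rw [← List.append_assoc]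
                exact (List.perm_append_singleton _ _).trans ((pvMerge_perm o2 m2).symm.cons _)
              · exact pvMerge_pairwise ho2 hm2n
            rw [hsort]
            exact ih (o2.length + (m2 ++ [a + 2 * b]).length) (by simp; omega)
              o2 (m2 ++ [a + 2 * b]) (steps + 1) rfl ho2 hm2n hinv2
      · next hst =>
        rcases hmg : pvMerge o m with _ | ⟨s', rest⟩
        · simp [pvALoop]
        · rw [hmg] at hh
          simp only [List.head?_cons, Option.some.injEq] at hh
          subst hh
          rw [pvALoop.eq_def]
          simp [hst]

-- ===== VERDICT (by name: the statement is the Claim_ definition above) =====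
theorem min_steps_to_target_sweetness_spec : Claim_equal_min_steps_to_target_sweetness := by
  intro t c _ _
  unfold Spec_min_steps_to_target_sweetness
  unfold min_steps_to_target_sweetness min_steps_to_target_sweetness_alt
  have hs : (pvSortInt c).Pairwise (· ≤ ·) := PySem.List.sorted_pairwise c (fun x => x)
  have := pvBLoop_eq t ((pvSortInt c).length + 0) (pvSortInt c) [] 0 (by simp) hs
    List.Pairwise.nil ⟨by simp, List.Pairwise.nil⟩
  rw [this, pvMerge_nil]
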